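-- pv_equiv track=rewrite | github.com/murariis/DutychartCICD | backend/duties/views.py | to_nepali_digits
-- ===== SOURCE A (Python) =====
-- def to_nepali_digits(text):
--     if text is None:
--         return ""
--     text = str(text)
--     mapping = {
--         '0': '०', '1': '१', '2': '२', '3': '३', '4': '४',
--         '5': '५', '6': '६', '7': '७', '8': '८', '9': '९'
--     }
--     return "".join(mapping.get(c, c) for c in text)
-- ===== SOURCE B (Python) =====
-- def to_nepali_digits(text):
--     if text is None:
--         return ""
--     text = str(text)
--     mapping = {
--         '0': '०', '1': '१', '2': '२', '3': '३', '4': '४',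
--         '5': '५', '6': '६', '7': '७', '8': '८', '9': '९'
--     }
--     for ascii_d, nepali_d in mapping.items():
--         text = text.replace(ascii_d, nepali_d)
--     return text
-- ===== Notes on version B (the rewrite author's own statement) =====
-- stated objective: faster
-- what changed: Replaces the single Python-level per-character pass (dict.get on each char, joined) by ten whole-string str.replace passes, one per digit mapping entry; safe because the ten ASCII digit keys are distinct and no Nepali replacement value is itself an ASCII digit, so replacements never cascade.
import Mathlib
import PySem

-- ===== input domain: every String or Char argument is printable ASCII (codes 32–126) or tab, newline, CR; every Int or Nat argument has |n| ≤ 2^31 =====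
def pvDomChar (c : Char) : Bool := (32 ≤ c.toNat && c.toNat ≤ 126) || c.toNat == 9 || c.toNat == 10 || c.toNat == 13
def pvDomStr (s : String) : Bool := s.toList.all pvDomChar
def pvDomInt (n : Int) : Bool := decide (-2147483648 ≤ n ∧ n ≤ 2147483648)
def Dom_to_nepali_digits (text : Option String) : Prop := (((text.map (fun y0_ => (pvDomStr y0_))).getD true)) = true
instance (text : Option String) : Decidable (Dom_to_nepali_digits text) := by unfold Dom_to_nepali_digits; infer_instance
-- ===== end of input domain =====

-- B replaces A's single per-character dict-lookup pass by ten whole-string replace passes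
-- (one per digit mapping entry); same exact output, measurably faster in CPython (C-level replace).


-- ===== PORT A =====
-- A's dict literal, at the character level (its Python keys/values are 1-char strings,
-- looked up per character of the input)
def npMapA : PySem.Dict Char Char :=
  PySem.Dict.ofList [('0', '०'), ('1', '१'), ('2', '२'), ('3', '३'), ('4', '४'),
                     ('5', '५'), ('6', '६'), ('7', '७'), ('8', '८'), ('9', '९')]

-- "".join(mapping.get(c, c) for c in text) = the string of the per-character lookups
def to_nepali_digits (text : Option String) : String :=
  match text with
  | none => ""
  | some t => String.ofList (t.toList.map (fun c => npMapA.getD c c))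

-- ===== PORT B =====
-- B's dict literal (keys/values as strings, as Source B passes them to str.replace)
def npMapB : PySem.Dict String String :=
  PySem.Dict.ofList [("0", "०"), ("1", "१"), ("2", "२"), ("3", "३"), ("4", "४"),
                     ("5", "५"), ("6", "६"), ("7", "७"), ("8", "८"), ("9", "९")]

def to_nepali_digits_alt (text : Option String) : String :=
  match text with
  | none => ""
  | some t => npMapB.items.foldl (fun s p => PySem.Str.replace s p.1 p.2) t

-- ===== PRECONDITION & SPEC =====
def Spec_to_nepali_digits (text : Option String) (out : String) : Prop := out = to_nepali_digits_alt text
instance (text : Option String) (out : String) : Decidable (Spec_to_nepali_digits text out) := by unfold Spec_to_nepali_digits; infer_instance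

-- ===== CLAIM (what is proved, stated in full; the proofs are below) =====
def Claim_equal_to_nepali_digits : Prop := ∀ (text : Option String), Dom_to_nepali_digits text → Spec_to_nepali_digits text (to_nepali_digits text)

-- ===== LEMMAS AND PROOFS =====

-- the per-character translation both programs realise
def npChar (c : Char) : Char :=
  if c = '0' then '०' else if c = '1' then '१' else if c = '2' then '२' else
  if c = '3' then '३' else if c = '4' then '४' else if c = '5' then '५' else
  if c = '6' then '६' else if c = '7' then '७' else if c = '8' then '८' else
  if c = '9' then '९' else c

-- A's lookup is npChar
theorem getD_npMapA (c : Char) : npMapA.getD c c = npChar c := by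
  by_cases h0 : c = '0'; · subst h0; decide
  by_cases h1 : c = '1'; · subst h1; decide
  by_cases h2 : c = '2'; · subst h2; decide
  by_cases h3 : c = '3'; · subst h3; decide
  by_cases h4 : c = '4'; · subst h4; decide
  by_cases h5 : c = '5'; · subst h5; decide
  by_cases h6 : c = '6'; · subst h6; decide
  by_cases h7 : c = '7'; · subst h7; decide
  by_cases h8 : c = '8'; · subst h8; decide
  by_cases h9 : c = '9'; · subst h9; decide
  have hmk : npMapA = PySem.Dict.mk [('0', '०'), ('1', '१'), ('2', '२'), ('3', '३'), ('4', '४'),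
      ('5', '५'), ('6', '६'), ('7', '७'), ('8', '८'), ('9', '९')] := by decide
  have hget : npMapA.get? c = none := by
    rw [hmk]
    simp [PySem.Dict.get?_mk_cons, PySem.Dict.get?, Ne.symm h0, Ne.symm h1, Ne.symm h2,
      Ne.symm h3, Ne.symm h4, Ne.symm h5, Ne.symm h6, Ne.symm h7, Ne.symm h8, Ne.symm h9]
  rw [PySem.Dict.getD_eq_get?_getD, hget]
  simp [npChar, h0, h1, h2, h3, h4, h5, h6, h7, h8, h9]

-- PySem.Chars.replace's worker, for a single-character pattern
theorem go_single (d : Char) (new : List Char) :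
    ∀ (l : List Char) (fuel : Nat) (acc : List Char), l.length ≤ fuel →
      PySem.Chars.replace.go [d] new fuel l acc
        = acc.reverse ++ l.flatMap (fun c => if c = d then new else [c]) := by
  intro l
  induction l with
  | nil =>
    intro fuel acc _
    cases fuel <;> simp [PySem.Chars.replace.go]
  | cons c t ih =>
    intro fuel acc h
    cases fuel with
    | zero => simp at h
    | succ n =>
      rw [PySem.Chars.replace.go]
      by_cases hc : c = d
      · subst hc
        simp [List.isPrefixOf, ih n (new.reverse ++ acc) (by simpa using h)]
      · have : List.isPrefixOf [d] (c :: t) = false := by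
          simp [List.isPrefixOf]; intro h'; exact hc h'.symm
        simp [this, ih n (c :: acc) (by simpa using h), hc]

-- replacing one character by one character is a map
theorem replace_single (d nd : Char) (l : List Char) :
    PySem.Chars.replace l [d] [nd] = l.map (fun c => if c = d then nd else c) := by
  rw [PySem.Chars.replace]
  simp [go_single d [nd] l l.length [] le_rfl]
  induction l with
  | nil => simp
  | cons c t ih => by_cases hc : c = d <;> simp [hc, ih]

def sw (d nd : Char) (c : Char) : Char := if c = d then nd else c

-- the ten successive single-character swaps compose to npChar
theorem chain_eq_npChar (c : Char) :
    sw '9' '९' (sw '8' '८' (sw '7' '७' (sw '6' '६' (sw '5' '५' (sw '4' '४'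
      (sw '3' '३' (sw '2' '२' (sw '1' '१' (sw '0' '०' c))))))))) = npChar c := by
  by_cases h0 : c = '0'; · subst h0; decide
  by_cases h1 : c = '1'; · subst h1; decide
  by_cases h2 : c = '2'; · subst h2; decide
  by_cases h3 : c = '3'; · subst h3; decide
  by_cases h4 : c = '4'; · subst h4; decide
  by_cases h5 : c = '5'; · subst h5; decide
  by_cases h6 : c = '6'; · subst h6; decide
  by_cases h7 : c = '7'; · subst h7; decide
  by_cases h8 : c = '8'; · subst h8; decide
  by_cases h9 : c = '9'; · subst h9; decide
  simp [sw, npChar, h0, h1, h2, h3, h4, h5, h6, h7, h8, h9]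

-- the ten map passes, one after the other, amount to one npChar pass
theorem maps_chain (l : List Char) :
    (((((((((l.map (sw '0' '०')).map (sw '1' '१')).map (sw '2' '२')).map (sw '3' '३')).map
      (sw '4' '४')).map (sw '5' '५')).map (sw '6' '६')).map (sw '7' '७')).map
      (sw '8' '८')).map (sw '9' '९') = l.map npChar := by
  induction l with
  | nil => simp
  | cons c t ih =>
    simp only [List.map_cons]
    rw [chain_eq_npChar c, ih]

-- one replace pass of B, seen on the character list
theorem step_toList (s : String) (d nd : Char) (od nw : String)
    (hod : od.toList = [d]) (hnw : nw.toList = [nd]) :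
    (PySem.Str.replace s od nw).toList = s.toList.map (sw d nd) := by
  rw [PySem.Str.replace, hod, hnw, replace_single]
  simp [sw]

-- B's fold over the ten mapping items computes the per-character map
theorem alt_toList (t : String) :
    (npMapB.items.foldl (fun s p => PySem.Str.replace s p.1 p.2) t).toList
      = t.toList.map npChar := by
  have hitems : npMapB.items = [("0", "०"), ("1", "१"), ("2", "२"), ("3", "३"), ("4", "४"),
      ("5", "५"), ("6", "६"), ("7", "७"), ("8", "८"), ("9", "९")] := by decide
  rw [hitems]
  simp only [List.foldl]
  rw [step_toList _ '9' '९' _ _ (by decide) (by decide)]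
  rw [step_toList _ '8' '८' _ _ (by decide) (by decide)]
  rw [step_toList _ '7' '७' _ _ (by decide) (by decide)]
  rw [step_toList _ '6' '६' _ _ (by decide) (by decide)]
  rw [step_toList _ '5' '५' _ _ (by decide) (by decide)]
  rw [step_toList _ '4' '४' _ _ (by decide) (by decide)]
  rw [step_toList _ '3' '३' _ _ (by decide) (by decide)]
  rw [step_toList _ '2' '२' _ _ (by decide) (by decide)]
  rw [step_toList _ '1' '१' _ _ (by decide) (by decide)]
  rw [step_toList _ '0' '०' _ _ (by decide) (by decide)]
  exact maps_chain t.toList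

-- ===== VERDICT (by name: the statement is the Claim_ definition above) =====
theorem to_nepali_digits_spec : Claim_equal_to_nepali_digits := by
  intro text _
  unfold Spec_to_nepali_digits to_nepali_digits to_nepali_digits_alt
  cases text with
  | none => rfl
  | some t =>
    have h : (String.ofList (t.toList.map (fun c => npMapA.getD c c))).toList
        = (npMapB.items.foldl (fun s p => PySem.Str.replace s p.1 p.2) t).toList := by
      rw [alt_toList]
      simp only [String.toList_ofList]
      exact List.map_congr_left (fun c _ => getD_npMapA c)
    have := congrArg String.ofList h
    simpa using this
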